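-- pv_equiv track=rewrite | github.com/Nghia03092004/nghia03092004.github.io | project_euler/problem_336/solution.py | solve_smart
-- ===== SOURCE A (Python) =====
-- def solve_smart(n):
--     """
--     Smart approach: generate maximix arrangements using reverse simulation.
--     Build the permutation by determining what arrangement would cause
--     each sorting step to be non-trivial.
--
--     At step k (placing element n-1-k at position n-1-k), the sorting does:
--       - Find pos of (n-1-k) in positions [0..n-1-k]
--       - pos != 0 and pos != n-1-k (for maximix)
--       - Reverse [0..pos], then reverse [0..n-1-k]
--
--     We reverse-engineer: starting from sorted, undo each step.
--     Undoing step k with choice pos: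
--       - Reverse [0..n-1-k] (undo second reversal)
--       - Reverse [0..pos] (undo first reversal)
--     After undoing, element (n-1-k) should be at position pos.
--     """
--     results = []
--
--     def generate(perm, step):
--         """
--         perm: current state after undoing steps from n-1 down to step+1
--         step: next step to undo (we undo from step n-2 down to 0)
--         remaining = step + 2 (number of unsorted elements at this step)
--         """
--         if step < 0:
--             results.append(tuple(perm))
--             return
--
--         remaining = step + 2  # Number of elements in unsorted portion
--         target = remaining - 1  # Element to place
--
--         # pos can be 1 to remaining-2 (not 0, not remaining-1)
--         for pos in range(1, remaining - 1):
--             p = list(perm)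
--             # Undo: reverse [0..remaining-1], then reverse [0..pos]
--             p[:remaining] = p[:remaining][::-1]
--             p[:pos+1] = p[:pos+1][::-1]
--             generate(p, step - 1)
--
--     # Start from sorted arrangement
--     sorted_perm = list(range(n))
--     # Undo steps from step n-2 down to step 0
--     # step n-2 corresponds to remaining = n, placing element n-1
--     generate(sorted_perm, n - 2)
--
--     results.sort()
--     return results
-- ===== SOURCE B (Python) =====
-- def solve_smart(n):
--     # Iterative level-by-level (BFS) expansion instead of recursive DFS;
--     # the shared first reversal of each level is hoisted out of the pos loop.
--     frontier = [list(range(n))]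
--     for step in range(n - 2, -1, -1):
--         remaining = step + 2
--         new_frontier = []
--         for perm in frontier:
--             rev = perm[:remaining][::-1] + perm[remaining:]
--             for pos in range(1, remaining - 1):
--                 new_frontier.append(rev[:pos + 1][::-1] + rev[pos + 1:])
--         frontier = new_frontier
--     results = sorted(tuple(p) for p in frontier)
--     return results
-- ===== Notes on version B (the rewrite author's own statement) =====
-- stated objective: alternative
-- what changed: Replaces the recursive DFS generator with an iterative level-by-level (BFS) frontier expansion that also hoists the shared per-level reversal out of the inner pos loop.
import Mathlib
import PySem

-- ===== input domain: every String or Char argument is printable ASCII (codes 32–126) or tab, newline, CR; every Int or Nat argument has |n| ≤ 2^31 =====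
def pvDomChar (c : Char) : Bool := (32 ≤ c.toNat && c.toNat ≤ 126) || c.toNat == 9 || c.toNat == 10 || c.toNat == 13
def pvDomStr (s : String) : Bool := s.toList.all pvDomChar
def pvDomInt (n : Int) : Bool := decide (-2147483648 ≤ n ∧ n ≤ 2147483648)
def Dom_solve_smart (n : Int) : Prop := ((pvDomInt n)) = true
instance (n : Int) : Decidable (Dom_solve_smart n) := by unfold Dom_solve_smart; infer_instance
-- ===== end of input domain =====

-- ===== PORT A =====
-- B changes only the traversal (iterative level-by-level expansion instead of
-- recursive DFS, with the shared per-level reversal hoisted); return values agree.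

-- p[:k] = p[:k][::-1]  (exact: k ≥ 0 at every use site; Python slices clamp like take/drop)
def pvRevPrefix (k : Int) (p : List Int) : List Int :=
  (p.take k.toNat).reverse ++ p.drop k.toNat

def pvGenA (perm : List Int) (step : Int) : List (List Int) :=
  if _h : step < 0 then [perm]
  else
    (PySem.List.pyRange 1 ((step + 2) - 1) 1).foldl
      (fun acc pos =>
        let p := pvRevPrefix (step + 2) perm
        let p := pvRevPrefix (pos + 1) p
        acc ++ pvGenA p (step - 1)) []
termination_by (step + 1).toNat
decreasing_by omega

def solve_smart (n : Int) : List (List Int) :=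
  let sorted_perm := PySem.List.pyRange 0 n 1
  let results := pvGenA sorted_perm (n - 2)
  PySem.List.sorted results (fun x => x) false

-- ===== PORT B =====
def pvExpand (step : Int) (frontier : List (List Int)) : List (List Int) :=
  frontier.foldl
    (fun acc perm =>
      let rev := pvRevPrefix (step + 2) perm
      acc ++ (PySem.List.pyRange 1 ((step + 2) - 1) 1).map
        (fun pos => pvRevPrefix (pos + 1) rev)) []

def solve_smart_alt (n : Int) : List (List Int) :=
  let frontier :=
    (PySem.List.pyRange (n - 2) (-1) (-1)).foldl
      (fun fr step => pvExpand step fr) [PySem.List.pyRange 0 n 1]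
  PySem.List.sorted frontier (fun x => x) false

-- ===== PRECONDITION & SPEC =====
def Spec_solve_smart (n : Int) (out : List (List Int)) : Prop := out = solve_smart_alt n
instance (n : Int) (out : List (List Int)) : Decidable (Spec_solve_smart n out) := by unfold Spec_solve_smart; infer_instance

-- ===== CLAIM (what is proved, stated in full; the proofs are below) =====
def Claim_equal_solve_smart : Prop := ∀ (n : Int), Dom_solve_smart n → Spec_solve_smart n (solve_smart n)

-- ===== LEMMAS AND PROOFS =====

theorem pvExpand_eq_flatMap (step : Int) (fr : List (List Int)) :
    pvExpand step fr =
      fr.flatMap (fun perm =>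
        (PySem.List.pyRange 1 ((step + 2) - 1) 1).map
          (fun pos => pvRevPrefix (pos + 1) (pvRevPrefix (step + 2) perm))) := by
  simp [pvExpand, List.flatMap_def]

theorem pvGenA_eq_flatMap (perm : List Int) (step : Int) (h : ¬ step < 0) :
    pvGenA perm step =
      (PySem.List.pyRange 1 ((step + 2) - 1) 1).flatMap
        (fun pos => pvGenA (pvRevPrefix (pos + 1) (pvRevPrefix (step + 2) perm)) (step - 1)) := by
  rw [pvGenA]
  simp only [h, dite_false]
  simp [List.flatMap_def]

theorem pvFrontier_eq_genA (k : Nat) :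
    ∀ (s : Int), (s + 1).toNat = k → ∀ (L : List (List Int)),
      (PySem.List.pyRange s (-1) (-1)).foldl (fun fr step => pvExpand step fr) L
        = L.flatMap (fun p => pvGenA p s) := by
  induction k with
  | zero =>
    intro s hs L
    have hneg : s < 0 := by omega
    rw [PySem.List.pyRange_neg_one_eq_nil (by omega : s ≤ -1)]
    simp only [List.foldl_nil]
    have : (fun p : List Int => pvGenA p s) = (fun p => [p]) := by
      funext p; rw [pvGenA]; simp [hneg]
    rw [this, List.flatMap_singleton']
  | succ k ih =>
    intro s hs L
    have hnn : ¬ s < 0 := by omega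
    rw [PySem.List.pyRange_neg_one_cons (by omega : (-1 : Int) < s)]
    rw [List.foldl_cons]
    rw [ih (s - 1) (by omega) (pvExpand s L)]
    rw [pvExpand_eq_flatMap, List.flatMap_assoc]
    congr 1
    funext p
    rw [List.flatMap_map, pvGenA_eq_flatMap p s hnn]

theorem solve_smart_spec : Claim_equal_solve_smart := by
  intro n _
  unfold Spec_solve_smart solve_smart solve_smart_alt
  rw [pvFrontier_eq_genA ((n - 2) + 1).toNat (n - 2) rfl]
  rw [List.flatMap_singleton]
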